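-- pv_equiv track=rewrite | github.com/SauravSinha76/scaler | class32/bitwise_OR_sum.py | solve
-- ===== SOURCE A (Python) =====
-- def solve(A):
--     n = len(A)
--     sum =0
--     for i in range(n):
--         a = 0
--         for j in range(i,n):
--             a |= A[j]
--             sum += a
--
--     return sum
-- ===== SOURCE B (Python) =====
-- def solve(A):
--     # DP over right endpoints: cnt maps each distinct OR of a subarray ending
--     # at the current position to the number of such subarrays (O(n * bits)
--     # distinct ORs), instead of re-OR-ing every (start, end) pair.
--     total = 0
--     cnt = {}
--     for x in A:
--         new = {}
--         for v, c in cnt.items():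
--             w = v | x
--             new[w] = new.get(w, 0) + c
--         new[x] = new.get(x, 0) + 1
--         cnt = new
--         total += sum(v * c for v, c in cnt.items())
--     return total
-- ===== Notes on version B (the rewrite author's own statement) =====
-- stated objective: faster
-- what changed: Replaces A's nested start/end enumeration of all subarrays with a single left-to-right pass that keeps a dict counting, for each distinct OR value of a subarray ending at the current position, how many such subarrays there are, and adds the dict's weighted sum per step.
import Mathlib
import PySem

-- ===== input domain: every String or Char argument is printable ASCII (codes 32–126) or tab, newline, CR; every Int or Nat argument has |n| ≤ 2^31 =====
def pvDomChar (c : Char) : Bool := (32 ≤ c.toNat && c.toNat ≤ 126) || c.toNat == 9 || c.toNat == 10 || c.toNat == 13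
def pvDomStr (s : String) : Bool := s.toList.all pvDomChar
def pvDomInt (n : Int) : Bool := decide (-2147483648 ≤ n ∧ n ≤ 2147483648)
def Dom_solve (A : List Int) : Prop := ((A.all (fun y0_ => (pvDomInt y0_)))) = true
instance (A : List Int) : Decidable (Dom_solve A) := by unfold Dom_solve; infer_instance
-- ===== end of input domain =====

-- B replaces A's quadratic start×end enumeration by a single pass over right endpoints
-- that keeps, in a dict, each distinct OR of a subarray ending there with its multiplicity (faster).

-- ===== PORT A =====
def solve (A : List Int) : Int :=
  let n : Int := A.length
  (PySem.List.pyRange 0 n 1).foldl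
    (fun s i =>
      ((PySem.List.pyRange i n 1).foldl
        (fun (p : Int × Int) j =>
          let a := PySem.Int.bor p.1 (PySem.List.pyGetD A j 0)
          (a, p.2 + a)) (0, s)).2) 0

-- ===== PORT B =====
def solve_alt (A : List Int) : Int :=
  (A.foldl
    (fun (st : PySem.Dict Int Int × Int) x =>
      let new0 := st.1.items.foldl
        (fun (d : PySem.Dict Int Int) vc =>
          let w := PySem.Int.bor vc.1 x
          d.insert w (d.getD w 0 + vc.2)) PySem.Dict.empty
      let new := new0.insert x (new0.getD x 0 + 1)
      (new, st.2 + new.items.foldl (fun s vc => s + vc.1 * vc.2) 0))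
    (PySem.Dict.empty, 0)).2

-- ===== PRECONDITION & SPEC =====
def Spec_solve (A : List Int) (out : Int) : Prop := out = solve_alt A
instance (A : List Int) (out : Int) : Decidable (Spec_solve A out) := by unfold Spec_solve; infer_instance

-- ===== CLAIM (what is proved, stated in full; the proofs are below) =====
def Claim_equal_solve : Prop := ∀ (A : List Int), Dom_solve A → Spec_solve A (solve A)

-- ===== LEMMAS AND PROOFS =====

theorem bor_zero_left (x : Int) : PySem.Int.bor 0 x = x := by
  rw [PySem.Int.bor_comm]; exact PySem.Int.bor_zero x

-- sum of the running ORs of A's inner loop, started at accumulator a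
def rowSum (a : Int) : List Int → Int
  | [] => 0
  | y :: ys => PySem.Int.bor a y + rowSum (PySem.Int.bor a y) ys

-- total added by A: one row per suffix
def SA : List Int → Int
  | [] => 0
  | y :: ys => rowSum 0 (y :: ys) + SA ys

-- ORs of the subarrays ending at the last element (one per suffix), left-folded as both programs do
def sufORs : List Int → List Int
  | [] => []
  | y :: ys => (y :: ys).foldl PySem.Int.bor 0 :: sufORs ys

-- what B's loop adds while consuming `rest`, given the ending-ORs list L of the consumed prefix
def TT (L : List Int) : List Int → Int
  | [] => 0
  | x :: xs =>
      ((L.map (fun v => PySem.Int.bor v x)).sum + x) +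
        TT (L.map (fun v => PySem.Int.bor v x) ++ [x]) xs

-- weighted sum of a counter dict under a value transform f
def Sf (f : Int → Int) (d : PySem.Dict Int Int) : Int :=
  (d.items.map (fun vc => f vc.1 * vc.2)).sum

theorem rowSum_append (l : List Int) (a x : Int) :
    rowSum a (l ++ [x]) = rowSum a l + PySem.Int.bor (l.foldl PySem.Int.bor a) x := by
  induction l generalizing a with
  | nil => simp [rowSum]
  | cons y ys ih => simp [rowSum, ih (PySem.Int.bor a y)]; ring

theorem sufORs_append (l : List Int) (x : Int) :
    sufORs (l ++ [x]) = (sufORs l).map (fun v => PySem.Int.bor v x) ++ [x] := by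
  induction l with
  | nil => simp [sufORs, bor_zero_left]
  | cons y ys ih => simp [sufORs, ih, List.foldl_append]

theorem SA_append (l : List Int) (x : Int) :
    SA (l ++ [x]) = SA l + ((sufORs l).map (fun v => PySem.Int.bor v x)).sum + x := by
  induction l with
  | nil => simp [SA, sufORs, rowSum, bor_zero_left]
  | cons y ys ih =>
    have h1 : (y :: ys) ++ [x] = y :: (ys ++ [x]) := rfl
    rw [h1]
    show rowSum 0 (y :: (ys ++ [x])) + SA (ys ++ [x]) = _
    have h2 : rowSum 0 (y :: (ys ++ [x])) = rowSum 0 ((y :: ys) ++ [x]) := rfl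
    rw [h2, rowSum_append, ih]
    simp [SA, sufORs]
    ring

theorem inner_loop (l : List Int) (a s : Int) :
    (l.foldl (fun (p : Int × Int) y =>
        let a' := PySem.Int.bor p.1 y
        (a', p.2 + a')) (a, s)).2 = s + rowSum a l := by
  induction l generalizing a s with
  | nil => simp [rowSum]
  | cons y ys ih => simp [List.foldl_cons, rowSum, ih]; ring

theorem range_rows (A : List Int) (s : Int) :
    (List.range A.length).foldl (fun s k => s + rowSum 0 (A.drop k)) s = s + SA A := by
  induction A generalizing s with
  | nil => simp [SA]
  | cons y ys ih =>
    rw [List.length_cons, List.range_succ_eq_map, List.foldl_cons, List.foldl_map]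
    simp only [List.drop_succ_cons, List.drop_zero]
    rw [ih (s + rowSum 0 (y :: ys))]
    simp [SA]; ring

theorem solve_eq_SA (A : List Int) : solve A = SA A := by
  unfold solve
  rw [PySem.List.foldl_congr_mem _ _
      (fun s i => s + rowSum 0 (A.drop i.toNat)) 0
      (by
        intro s i hi
        have h0 : (0 : Int) ≤ i := (PySem.List.mem_pyRange_one.mp hi).1
        rw [PySem.List.foldl_pyRange_pyGetD' A 0
            (fun (p : Int × Int) y =>
              let a' := PySem.Int.bor p.1 y
              (a', p.2 + a')) (0, s) h0]
        exact inner_loop (A.drop i.toNat) 0 s)]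
  rw [show ((A.length : Int)) = ((A.length : Nat) : Int) from rfl,
      PySem.List.pyRange_zero_nat, List.foldl_map]
  simpa using range_rows A 0

theorem Sf_empty (f : Int → Int) : Sf f PySem.Dict.empty = 0 := rfl

theorem replace_sum (L : List (Int × Int)) (k v0 w : Int) (f : Int → Int)
    (hnd : (L.map Prod.fst).Nodup) (hm : (k, v0) ∈ L) :
    ((L.map (fun p => if p.1 == k then (k, w) else p)).map (fun vc => f vc.1 * vc.2)).sum =
      (L.map (fun vc => f vc.1 * vc.2)).sum - f k * v0 + f k * w := by
  induction L with
  | nil => cases hm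
  | cons p ps ih =>
    rw [List.map_cons, List.nodup_cons] at hnd
    rcases List.mem_cons.mp hm with h | h
    · have hp : p = (k, v0) := h.symm
      subst hp
      have hrest : ps.map (fun q => if q.1 == k then ((k : Int), w) else q) = ps := by
        have hq : ∀ q ∈ ps, (if q.1 == k then ((k : Int), w) else q) = q := by
          intro q hq'
          have hne : q.1 ≠ k := by
            intro he
            have hk : q.1 ∈ ps.map Prod.fst := List.mem_map_of_mem (f := Prod.fst) hq'
            rw [he] at hk
            exact hnd.1 hk
          simp [hne]
        rw [List.map_congr_left hq]
        exact List.map_id' ps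
      rw [List.map_cons, List.map_cons, List.map_cons, List.sum_cons, List.sum_cons, hrest]
      simp only [beq_self_eq_true, if_true]
      ring
    · have hne : p.1 ≠ k := by
        intro he
        have hk : k ∈ ps.map Prod.fst := List.mem_map_of_mem (f := Prod.fst) h
        rw [← he] at hk
        exact hnd.1 hk
      have hif : (if p.1 == k then ((k : Int), w) else p) = p := by simp [hne]
      rw [List.map_cons, List.map_cons, List.map_cons, List.sum_cons, List.sum_cons, hif,
        ih hnd.2 h]
      ring

theorem Sf_insert_add (d : PySem.Dict Int Int) (k c : Int) (f : Int → Int)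
    (hnd : d.keys.Nodup) :
    Sf f (d.insert k (d.getD k 0 + c)) = Sf f d + f k * c := by
  by_cases hc : d.contains k = true
  · have hs : (d.get? k).isSome := by rw [← PySem.Dict.contains_eq_isSome_get?]; exact hc
    rcases Option.isSome_iff_exists.mp hs with ⟨v0, hv0⟩
    have hmem : (k, v0) ∈ d.items := PySem.Dict.mem_items_of_get?_eq_some d hv0
    have hgd : d.getD k 0 = v0 := PySem.Dict.getD_of_mem_items d hmem hnd 0
    have hkeys : (d.items.map Prod.fst).Nodup := hnd
    rw [Sf, PySem.Dict.items_insert_of_contains d _ hc,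
        replace_sum d.items k v0 (d.getD k 0 + c) f hkeys hmem, hgd]
    unfold Sf; ring
  · have hc' : d.contains k = false := by revert hc; cases d.contains k <;> simp
    rw [Sf, PySem.Dict.items_insert_of_not_contains d _ hc',
        PySem.Dict.getD_of_not_contains d 0 hc']
    unfold Sf; simp

theorem build_fold (its : List (Int × Int)) (d : PySem.Dict Int Int) (x : Int)
    (f : Int → Int) (hnd : d.keys.Nodup) :
    Sf f (its.foldl (fun d vc =>
        let w := PySem.Int.bor vc.1 x
        d.insert w (d.getD w 0 + vc.2)) d) =
      Sf f d + (its.map (fun vc => f (PySem.Int.bor vc.1 x) * vc.2)).sum := by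
  induction its generalizing d with
  | nil => simp
  | cons vc rest ih =>
    rw [List.foldl_cons]
    have hnd' : ((d.insert (PySem.Int.bor vc.1 x)
        (d.getD (PySem.Int.bor vc.1 x) 0 + vc.2)).keys).Nodup :=
      PySem.Dict.nodup_keys_insert d _ _ hnd
    simp only [ih _ hnd', Sf_insert_add d _ _ f hnd, List.map_cons, List.sum_cons]
    ring

theorem invariant_loop (rest : List Int) (L : List Int) (cnt : PySem.Dict Int Int) (t : Int)
    (hnd : cnt.keys.Nodup) (hS : ∀ f : Int → Int, Sf f cnt = (L.map f).sum) :
    (rest.foldl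
      (fun (st : PySem.Dict Int Int × Int) x =>
        let new0 := st.1.items.foldl
          (fun (d : PySem.Dict Int Int) vc =>
            let w := PySem.Int.bor vc.1 x
            d.insert w (d.getD w 0 + vc.2)) PySem.Dict.empty
        let new := new0.insert x (new0.getD x 0 + 1)
        (new, st.2 + new.items.foldl (fun s vc => s + vc.1 * vc.2) 0))
      (cnt, t)).2 = t + TT L rest := by
  induction rest generalizing L cnt t with
  | nil => simp [TT]
  | cons x xs ih =>
    rw [List.foldl_cons]
    set new0 := cnt.items.foldl
      (fun (d : PySem.Dict Int Int) vc =>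
        let w := PySem.Int.bor vc.1 x
        d.insert w (d.getD w 0 + vc.2)) PySem.Dict.empty with hnew0
    have hnd0 : new0.keys.Nodup := by
      rw [hnew0]
      exact PySem.Dict.nodup_keys_foldl_insert_key cnt.items
        (fun vc => PySem.Int.bor vc.1 x) _ PySem.Dict.empty PySem.Dict.nodup_keys_empty
    set new := new0.insert x (new0.getD x 0 + 1) with hnew
    have hndn : new.keys.Nodup := PySem.Dict.nodup_keys_insert new0 _ _ hnd0
    have hSnew : ∀ f : Int → Int,
        Sf f new = ((L.map (fun v => PySem.Int.bor v x) ++ [x]).map f).sum := by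
      intro f
      have h0 : Sf f new0 = (cnt.items.map (fun vc => f (PySem.Int.bor vc.1 x) * vc.2)).sum := by
        rw [hnew0, build_fold cnt.items PySem.Dict.empty x f PySem.Dict.nodup_keys_empty,
          Sf_empty, zero_add]
      have h1 : (cnt.items.map (fun vc => f (PySem.Int.bor vc.1 x) * vc.2)).sum =
          Sf (fun v => f (PySem.Int.bor v x)) cnt := rfl
      rw [hnew, Sf_insert_add new0 x 1 f hnd0, h0, h1, hS]
      simp [List.map_map, Function.comp_def]
    have hadd : new.items.foldl (fun s vc => s + vc.1 * vc.2) 0 =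
        (L.map (fun v => PySem.Int.bor v x)).sum + x := by
      rw [PySem.List.foldl_add new.items (fun vc => vc.1 * vc.2) 0, zero_add]
      have : (new.items.map (fun vc => vc.1 * vc.2)).sum = Sf (fun v => v) new := by
        simp [Sf]
      rw [this, hSnew (fun v => v)]
      simp [Function.comp_def]
    rw [ih (L.map (fun v => PySem.Int.bor v x) ++ [x]) new _ hndn hSnew, TT, hadd]
    ring

theorem solve_alt_eq_TT (A : List Int) : solve_alt A = TT [] A := by
  unfold solve_alt
  rw [invariant_loop A [] PySem.Dict.empty 0 PySem.Dict.nodup_keys_empty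
    (fun f => by simp [Sf_empty])]
  simp

theorem SA_eq_TT (rest : List Int) : ∀ pre : List Int,
    SA (pre ++ rest) = SA pre + TT (sufORs pre) rest := by
  induction rest with
  | nil => intro pre; simp [TT]
  | cons x xs ih =>
    intro pre
    have h1 : pre ++ x :: xs = (pre ++ [x]) ++ xs := by simp
    rw [h1, ih (pre ++ [x]), SA_append, TT, sufORs_append]
    ring

-- ===== VERDICT (by name: the statement is the Claim_ definition above) =====
theorem solve_spec : Claim_equal_solve := by
  intro A _
  show solve A = solve_alt A
  rw [solve_eq_SA, solve_alt_eq_TT]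
  have := SA_eq_TT A []
  simpa [SA, sufORs] using this
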